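-- pv_equiv track=rewrite | github.com/pypi-data/pypi-mirror-347 | packages/isotools/isotools-2.0.0.tar.gz/isotools-2.0.0/src/isotools/_gene_plots.py | genome_pos_to_gene_segments
-- ===== SOURCE A (Python) =====
-- def genome_pos_to_gene_segments(pos, genome_map, strict=True):
--     pos = sorted(set(pos))
--     offset = 0
--     reverse_strand = genome_map[0][0] > genome_map[-1][1]
--     if reverse_strand:
--         genome_map = [(seg[1], seg[0]) for seg in reversed(genome_map)]
--     mapped_pos = []
--     i = 0
--     for seg in genome_map:
--         while seg[1] >= pos[i]:
--             if seg[0] <= pos[i]: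
--                 mapped_pos.append(offset + pos[i] - seg[0])
--             elif not strict:
--                 mapped_pos.append(offset)
--             else:
--                 mapped_pos.append(None)
--             i += 1
--             if i == len(pos):
--                 break
--         else:
--             offset += seg[1] - seg[0]
--             continue
--         break
--     else:
--         for _i in range(i, len(pos)):
--             mapped_pos.append(None if strict else offset)
--     if reverse_strand:
--         trlen = sum(seg[1] - seg[0] for seg in genome_map)
--         mapped_pos = [trlen - mp if mp is not None else None for mp in mapped_pos]
--     return {p: mp for p, mp in zip(pos, mapped_pos)}
-- ===== SOURCE B (Python) =====
-- def genome_pos_to_gene_segments(pos, genome_map, strict=True):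
--     positions = sorted(set(pos))
--     reverse_strand = genome_map[0][0] > genome_map[-1][1]
--     if reverse_strand:
--         segs = [(e, s) for s, e in reversed(genome_map)]
--     else:
--         segs = list(genome_map)
--     cum = [0]
--     for s, e in segs:
--         cum.append(cum[-1] + (e - s))
--     trlen = cum[-1]
--
--     def lookup(p):
--         for (s, e), c in zip(segs, cum):
--             if e >= p:
--                 if s <= p:
--                     return c + p - s
--                 return None if strict else c
--         return None if strict else trlen
--
--     def orient(m):
--         if reverse_strand and m is not None:
--             return trlen - m
--         return m
--
--     return {p: orient(lookup(p)) for p in positions}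
-- ===== Notes on version B (the rewrite author's own statement) =====
-- stated objective: alternative
-- what changed: A interleaves positions and segments in one stateful two-pointer loop with for/while/else and break; B precomputes a prefix-sum array of cumulative segment offsets and maps each position independently with a self-contained per-position lookup, applying the reverse-strand flip per element.
import Mathlib
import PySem

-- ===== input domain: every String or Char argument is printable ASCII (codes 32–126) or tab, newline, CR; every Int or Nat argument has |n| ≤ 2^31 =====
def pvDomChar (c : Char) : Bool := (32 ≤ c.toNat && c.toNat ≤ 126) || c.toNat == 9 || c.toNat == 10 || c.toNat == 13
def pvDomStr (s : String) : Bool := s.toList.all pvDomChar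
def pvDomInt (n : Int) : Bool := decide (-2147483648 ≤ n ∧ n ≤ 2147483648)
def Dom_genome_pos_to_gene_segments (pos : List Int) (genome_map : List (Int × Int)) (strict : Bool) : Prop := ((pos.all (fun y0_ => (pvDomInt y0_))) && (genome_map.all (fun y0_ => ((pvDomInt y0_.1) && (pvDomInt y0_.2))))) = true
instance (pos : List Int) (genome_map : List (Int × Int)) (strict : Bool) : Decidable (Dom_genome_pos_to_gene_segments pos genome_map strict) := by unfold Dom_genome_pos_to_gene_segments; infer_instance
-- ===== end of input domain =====

-- B replaces A's stateful two-pointer for/while/else loop by a prefix-sum array of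
-- cumulative offsets and an independent per-position lookup (alternative decomposition).


-- ===== PORT A =====
-- the inner 'while seg[1] >= pos[i]' loop: returns the values appended and
-- 'none' for Python's break at i == len(pos), 'some rem' for normal exit (for-else continue)
def pvWhileA (strict : Bool) (s e : Int) : List Int → Int → List (Option Int) × Option (List Int)
  | [], _ => ([], none)
  | p :: tl, offset =>
    if e ≥ p then
      let r := pvWhileA strict s e tl offset
      ((if s ≤ p then some (offset + p - s) else if !strict then some offset else none) :: r.1, r.2)
    else ([], some (p :: tl))

-- the outer 'for seg in genome_map: … else: …' loop
def pvForA (strict : Bool) : List (Int × Int) → List Int → Int → List (Option Int)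
  | [], ps, offset => ps.map (fun _ => if strict then none else some offset)
  | (s, e) :: rest, ps, offset =>
    match pvWhileA strict s e ps offset with
    | (vs, none) => vs
    | (vs, some rem) => vs ++ pvForA strict rest rem (offset + (e - s))

def genome_pos_to_gene_segments (pos : List Int) (genome_map : List (Int × Int)) (strict : Bool) : List (Int × Option Int) :=
  let ps := PySem.List.sorted (PySem.Set.ofList pos) (fun x => x) false
  let rev : Bool := decide ((genome_map.headD (0, 0)).1 > (genome_map.getLastD (0, 0)).2)
  let gm := if rev then genome_map.reverse.map (fun seg => (seg.2, seg.1)) else genome_map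
  let mapped := pvForA strict gm ps 0
  let mapped' :=
    if rev then
      let trlen := (gm.map (fun seg => seg.2 - seg.1)).sum
      mapped.map (fun mp => match mp with | some v => some (trlen - v) | none => none)
    else mapped
  ps.zip mapped'

-- ===== PORT B =====
-- cum = [0]; for s, e in segs: cum.append(cum[-1] + (e - s))
def pvCumStep (cum : List Int) (seg : Int × Int) : List Int :=
  cum ++ [cum.getLastD 0 + (seg.2 - seg.1)]

-- 'for (s, e), c in zip(segs, cum): …' — recursion on both lists, zip-style
def pvLookupB (strict : Bool) (p trlen : Int) : List (Int × Int) → List Int → Option Int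
  | (s, e) :: rs, c :: cs =>
    if e ≥ p then (if s ≤ p then some (c + p - s) else if strict then none else some c)
    else pvLookupB strict p trlen rs cs
  | _, _ => if strict then none else some trlen

def genome_pos_to_gene_segments_alt (pos : List Int) (genome_map : List (Int × Int)) (strict : Bool) : List (Int × Option Int) :=
  let positions := PySem.List.sorted (PySem.Set.ofList pos) (fun x => x) false
  let rev : Bool := decide ((genome_map.headD (0, 0)).1 > (genome_map.getLastD (0, 0)).2)
  let segs := if rev then genome_map.reverse.map (fun seg => (seg.2, seg.1)) else genome_map
  let cum := segs.foldl pvCumStep [0]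
  let trlen := cum.getLastD 0
  positions.map (fun p =>
    (p, let m := pvLookupB strict p trlen segs cum
        if rev then (match m with | some v => some (trlen - v) | none => none) else m))

-- ===== PRECONDITION & SPEC =====
-- Python A raises IndexError when genome_map is empty (genome_map[0]) or pos is empty (pos[0]).
def Pre_genome_pos_to_gene_segments (pos : List Int) (genome_map : List (Int × Int)) (strict : Bool) : Prop :=
  pos ≠ [] ∧ genome_map ≠ []
instance (pos : List Int) (genome_map : List (Int × Int)) (strict : Bool) : Decidable (Pre_genome_pos_to_gene_segments pos genome_map strict) := by unfold Pre_genome_pos_to_gene_segments; infer_instance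
def pvWitness_genome_pos_to_gene_segments : List Int × (List (Int × Int)) × Bool := ([3, 7], [(0, 5), (10, 12)], true)


def Spec_genome_pos_to_gene_segments (pos : List Int) (genome_map : List (Int × Int)) (strict : Bool) (out : List (Int × Option Int)) : Prop := out = genome_pos_to_gene_segments_alt pos genome_map strict
instance (pos : List Int) (genome_map : List (Int × Int)) (strict : Bool) (out : List (Int × Option Int)) : Decidable (Spec_genome_pos_to_gene_segments pos genome_map strict out) := by unfold Spec_genome_pos_to_gene_segments; infer_instance

-- ===== CLAIM (what is proved, stated in full; the proofs are below) =====
def Claim_equal_genome_pos_to_gene_segments : Prop := ∀ (pos : List Int) (genome_map : List (Int × Int)) (strict : Bool), Dom_genome_pos_to_gene_segments pos genome_map strict → Pre_genome_pos_to_gene_segments pos genome_map strict → Spec_genome_pos_to_gene_segments pos genome_map strict (genome_pos_to_gene_segments pos genome_map strict)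

-- ===== LEMMAS AND PROOFS =====
-- closed-form value of one position under A's loop: first segment whose end ≥ p,
-- with the offset accumulated over the skipped segments
def pvLook (strict : Bool) (p : Int) : List (Int × Int) → Int → Option Int
  | [], off => if strict then none else some off
  | (s, e) :: rest, off =>
    if e ≥ p then (if s ≤ p then some (off + p - s) else if !strict then some off else none)
    else pvLook strict p rest (off + (e - s))

def pvCumTail : List (Int × Int) → Int → List Int
  | [], _ => []
  | g :: rs, c => (c + (g.2 - g.1)) :: pvCumTail rs (c + (g.2 - g.1))

def pvSumLen (segs : List (Int × Int)) : Int := (segs.map (fun g => g.2 - g.1)).sum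

lemma pv_forA_cons_of_ge (strict : Bool) (s e p : Int) (tl : List Int) (rest : List (Int × Int))
    (offset : Int) (h : e ≥ p) :
    pvForA strict ((s, e) :: rest) (p :: tl) offset =
      (if s ≤ p then some (offset + p - s) else if !strict then some offset else none) ::
        pvForA strict ((s, e) :: rest) tl offset := by
  rcases hr : pvWhileA strict s e tl offset with ⟨vs, rem⟩
  cases rem <;> simp [pvForA, pvWhileA, h, hr]

lemma pv_forA_eq_map (strict : Bool) (segs : List (Int × Int)) :
    ∀ (ps : List Int) (offset : Int), ps.Pairwise (· ≤ ·) →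
      pvForA strict segs ps offset = ps.map (fun p => pvLook strict p segs offset) := by
  induction segs with
  | nil => intro ps offset _; simp [pvForA, pvLook]
  | cons se rest ih =>
    obtain ⟨s, e⟩ := se
    intro ps
    induction ps with
    | nil => intro offset _; simp [pvForA, pvWhileA]
    | cons p tl ihp =>
      intro offset hp
      by_cases h : e ≥ p
      · rw [pv_forA_cons_of_ge strict s e p tl rest offset h,
          ihp offset (List.Pairwise.of_cons hp)]
        simp [pvLook, h]
      · have h1 : pvForA strict ((s, e) :: rest) (p :: tl) offset =
            pvForA strict rest (p :: tl) (offset + (e - s)) := by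
          simp [pvForA, pvWhileA, h]
        rw [h1, ih (p :: tl) (offset + (e - s)) hp]
        apply List.map_congr_left
        intro q hq
        have hpq : p ≤ q := by
          rcases List.mem_cons.mp hq with rfl | hq'
          · exact le_refl q
          · exact List.rel_of_pairwise_cons hp hq'
        have hq2 : ¬ e ≥ q := by omega
        simp [pvLook, hq2]

lemma pv_cum_foldl (segs : List (Int × Int)) :
    ∀ (acc : List Int) (c : Int),
      segs.foldl pvCumStep (acc ++ [c]) = (acc ++ [c]) ++ pvCumTail segs c := by
  induction segs with
  | nil => intro acc c; simp [pvCumTail]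
  | cons g rs ih =>
    intro acc c
    have hstep : pvCumStep (acc ++ [c]) g = (acc ++ [c]) ++ [c + (g.2 - g.1)] := by
      simp [pvCumStep]
    calc (g :: rs).foldl pvCumStep (acc ++ [c])
        = rs.foldl pvCumStep ((acc ++ [c]) ++ [c + (g.2 - g.1)]) := by
          simp [List.foldl_cons, hstep]
      _ = ((acc ++ [c]) ++ [c + (g.2 - g.1)]) ++ pvCumTail rs (c + (g.2 - g.1)) := by
          exact ih (acc ++ [c]) (c + (g.2 - g.1))
      _ = (acc ++ [c]) ++ pvCumTail (g :: rs) c := by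
          simp [pvCumTail]

lemma pv_cum_eq (segs : List (Int × Int)) :
    segs.foldl pvCumStep [0] = 0 :: pvCumTail segs 0 := by
  have := pv_cum_foldl segs [] 0
  simpa using this

lemma pv_cum_last (segs : List (Int × Int)) :
    ∀ c : Int, (c :: pvCumTail segs c).getLastD 0 = c + pvSumLen segs := by
  induction segs with
  | nil => intro c; simp [pvCumTail, pvSumLen]
  | cons g rs ih =>
    intro c
    have := ih (c + (g.2 - g.1))
    simp only [pvCumTail, List.getLastD_cons] at *
    rw [this]
    simp [pvSumLen]
    ring

lemma pv_lookupB_eq_look (strict : Bool) (p : Int) (segs : List (Int × Int)) :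
    ∀ (c trlen : Int), trlen = c + pvSumLen segs →
      pvLookupB strict p trlen segs (c :: pvCumTail segs c) = pvLook strict p segs c := by
  induction segs with
  | nil =>
    intro c trlen htr
    have : trlen = c := by simpa [pvSumLen] using htr
    subst this
    cases strict <;> simp [pvLookupB, pvLook]
  | cons g rs ih =>
    obtain ⟨s, e⟩ := g
    intro c trlen htr
    have htr' : trlen = (c + (e - s)) + pvSumLen rs := by
      simp [pvSumLen] at htr ⊢; omega
    by_cases h : e ≥ p
    · cases strict <;> simp [pvLookupB, pvLook, h]
    · simp only [pvLookupB, pvLook, pvCumTail, if_neg h]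
      exact ih (c + (e - s)) trlen htr'

-- zip of a list with a map over itself
lemma pv_zip_self_map {α β : Type} (l : List α) (f : α → β) :
    l.zip (l.map f) = l.map (fun a => (a, f a)) := by
  induction l with
  | nil => rfl
  | cons a tl ih => simp [ih]

lemma pv_look_value (strict : Bool) (p : Int) (segs : List (Int × Int)) :
    pvLookupB strict p ((segs.foldl pvCumStep [0]).getLastD 0) segs (segs.foldl pvCumStep [0])
      = pvLook strict p segs 0 := by
  have hcum : segs.foldl pvCumStep [0] = 0 :: pvCumTail segs 0 := pv_cum_eq segs
  have hlast : (0 :: pvCumTail segs 0).getLastD 0 = pvSumLen segs := by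
    simpa using pv_cum_last segs 0
  rw [hcum, hlast]
  exact pv_lookupB_eq_look strict p segs 0 (pvSumLen segs) (by simp)

lemma pv_trlen_eq (segs : List (Int × Int)) :
    (segs.foldl pvCumStep [0]).getLastD 0 = (segs.map (fun seg => seg.2 - seg.1)).sum := by
  rw [pv_cum_eq segs]
  simpa [pvSumLen] using pv_cum_last segs 0

lemma pv_core_flat (strict : Bool) (segs : List (Int × Int)) (ps : List Int)
    (hpair : ps.Pairwise (· ≤ ·)) :
    ps.zip (pvForA strict segs ps 0) =
      ps.map (fun p => (p,
        pvLookupB strict p ((segs.foldl pvCumStep [0]).getLastD 0) segs (segs.foldl pvCumStep [0]))) := by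
  rw [pv_forA_eq_map strict segs ps 0 hpair, pv_zip_self_map]
  apply List.map_congr_left
  intro p _
  rw [pv_look_value]

lemma pv_core_rev (strict : Bool) (segs : List (Int × Int)) (ps : List Int)
    (hpair : ps.Pairwise (· ≤ ·)) :
    ps.zip ((pvForA strict segs ps 0).map (fun mp => match mp with
        | some v => some ((segs.map (fun seg => seg.2 - seg.1)).sum - v)
        | none => none)) =
      ps.map (fun p => (p,
        match pvLookupB strict p ((segs.foldl pvCumStep [0]).getLastD 0) segs (segs.foldl pvCumStep [0]) with
        | some v => some (((segs.foldl pvCumStep [0]).getLastD 0) - v)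
        | none => none)) := by
  rw [pv_forA_eq_map strict segs ps 0 hpair, List.map_map, pv_zip_self_map]
  apply List.map_congr_left
  intro p _
  rw [pv_look_value, pv_trlen_eq]
  rfl

-- ===== VERDICT (by name: the statement is the Claim_ definition above) =====
theorem genome_pos_to_gene_segments_spec : Claim_equal_genome_pos_to_gene_segments := by
  intro pos genome_map strict _ _
  unfold Spec_genome_pos_to_gene_segments
  unfold genome_pos_to_gene_segments genome_pos_to_gene_segments_alt
  have hpair : (PySem.List.sorted (PySem.Set.ofList pos) (fun x => x) false).Pairwise (· ≤ ·) :=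
    (PySem.List.sorted_ofList_pairwise_lt (xs := pos)).imp (fun h => le_of_lt h)
  dsimp only
  generalize (PySem.List.sorted (PySem.Set.ofList pos) (fun x => x) false) = ps at hpair ⊢
  generalize (decide ((genome_map.headD (0, 0)).1 > (genome_map.getLastD (0, 0)).2)) = rev
  cases rev with
  | false =>
    simp only [Bool.false_eq_true, if_false]
    exact pv_core_flat strict genome_map ps hpair
  | true =>
    simp only [if_true]
    exact pv_core_rev strict (genome_map.reverse.map (fun seg => (seg.2, seg.1))) ps hpair
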